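-- pv_equiv track=rewrite | github.com/pypi-data/pypi-mirror-281 | packages/routeml/routeml-0.24.0-py3-none-any.whl/routeml/utils.py | solution_to_routes
-- ===== SOURCE A (Python) =====
-- def solution_to_routes(solution, partial=False):
--     """
--     Converts a solution (list of nodes) into a list of routes.
--
--     Args:
--         solution (list): Solution (list of nodes).
--
--     Returns:
--         list: List of routes, where each route is a list of nodes.
--     """
--     routes = []
--     route = []
--     for node in solution:
--         if node == 0 and route:
--             route.append(0)
--             routes.append(route)
--             route = []
--         route.append(node)
--     if partial:
--         routes.append(route)
--     return routes
-- ===== SOURCE B (Python) =====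
-- def solution_to_routes(solution, partial=False):
--     """Recursive splitting: find the next zero past the segment head and slice."""
--     def go(seg):
--         tail = seg[1:]
--         if 0 not in tail:
--             return [seg] if partial else []
--         j = tail.index(0) + 1
--         return [seg[:j + 1]] + go(seg[j:])
--     return go(list(solution))
-- ===== Notes on version B (the rewrite author's own statement) =====
-- stated objective: alternative
-- what changed: Replaces the elementwise accumulator loop (append node by node, flush at zeros) with a recursive index-and-slice decomposition: find the first zero after the segment head, emit that slice, recurse on the rest.
import Mathlib
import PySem

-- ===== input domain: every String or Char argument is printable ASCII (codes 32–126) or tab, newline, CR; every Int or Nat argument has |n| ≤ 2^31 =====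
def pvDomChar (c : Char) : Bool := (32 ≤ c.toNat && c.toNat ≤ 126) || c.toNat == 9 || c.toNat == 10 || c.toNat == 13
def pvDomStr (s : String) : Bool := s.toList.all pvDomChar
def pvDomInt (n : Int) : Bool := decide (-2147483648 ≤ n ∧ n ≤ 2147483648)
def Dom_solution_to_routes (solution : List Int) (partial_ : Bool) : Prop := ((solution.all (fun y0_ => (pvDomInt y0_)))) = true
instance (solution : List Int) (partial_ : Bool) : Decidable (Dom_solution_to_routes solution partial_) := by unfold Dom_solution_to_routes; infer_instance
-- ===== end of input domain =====

-- B replaces A's elementwise accumulator loop by a recursive find-next-zero-and-slice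
-- decomposition (alternative structure, same O(n) cost; return values proved equal).

-- ===== PORT A =====
-- one loop iteration of A: possibly flush the route at a zero, then append the node
def stepA (st : List (List Int) × List Int) (node : Int) : List (List Int) × List Int :=
  let p := if node == 0 && !st.2.isEmpty then (st.1 ++ [st.2 ++ [(0 : Int)]], ([] : List Int))
           else (st.1, st.2)
  (p.1, p.2 ++ [node])

def solution_to_routes (solution : List Int) (partial_ : Bool) : List (List Int) :=
  let st := solution.foldl stepA ([], [])
  if partial_ then st.1 ++ [st.2] else st.1

-- ===== PORT B =====
-- Source B's `go`: tail = seg[1:]; if 0 not in tail: done; else j = tail.index(0)+1,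
-- emit seg[:j+1] and recurse on seg[j:]
def goB (partial_ : Bool) (seg : List Int) : List (List Int) :=
  match h : PySem.List.index? (seg.drop 1) 0 with
  | none => if partial_ then [seg] else []
  | some j => seg.take (j + 2) :: goB partial_ (seg.drop (j + 1))
termination_by seg.length
decreasing_by
  have hmem : (0 : Int) ∈ seg.drop 1 := (PySem.List.index?_isSome_iff _ _).mp (by rw [h]; rfl)
  have hne : seg ≠ [] := by rintro rfl; simp at hmem
  have : 0 < seg.length := List.length_pos_iff.mpr hne
  simp [List.length_drop]; omega

def solution_to_routes_alt (solution : List Int) (partial_ : Bool) : List (List Int) :=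
  goB partial_ solution

-- ===== PRECONDITION & SPEC =====
def Spec_solution_to_routes (solution : List Int) (partial_ : Bool) (out : List (List Int)) : Prop := out = solution_to_routes_alt solution partial_
instance (solution : List Int) (partial_ : Bool) (out : List (List Int)) : Decidable (Spec_solution_to_routes solution partial_ out) := by unfold Spec_solution_to_routes; infer_instance

-- ===== CLAIM (what is proved, stated in full; the proofs are below) =====
def Claim_equal_solution_to_routes : Prop := ∀ (solution : List Int) (partial_ : Bool), Dom_solution_to_routes solution partial_ → Spec_solution_to_routes solution partial_ (solution_to_routes solution partial_)

-- ===== LEMMAS AND PROOFS =====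

-- proof-side description of A's remaining work given a nonempty pending route
def goPending (partial_ : Bool) (pending : List Int) (l : List Int) : List (List Int) :=
  match h : PySem.List.index? l 0 with
  | none => if partial_ then [pending ++ l] else []
  | some j => (pending ++ l.take (j + 1)) :: goPending partial_ [0] (l.drop (j + 1))
termination_by l.length
decreasing_by
  have hmem : (0 : Int) ∈ l := (PySem.List.index?_isSome_iff _ _).mp (by rw [h]; rfl)
  have hne : l ≠ [] := by rintro rfl; simp at hmem
  have : 0 < l.length := List.length_pos_iff.mpr hne
  simp [List.length_drop]; omega

-- unfolding equations for goB and goPending (their dependent matches do not rw directly)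
theorem goB_none (p : Bool) (seg : List Int) (h : PySem.List.index? (seg.drop 1) 0 = none) :
    goB p seg = if p then [seg] else [] := by
  rw [goB.eq_def]; split
  · rfl
  · next j heq => rw [h] at heq; cases heq

theorem goB_some (p : Bool) (seg : List Int) (j : Nat)
    (h : PySem.List.index? (seg.drop 1) 0 = some j) :
    goB p seg = seg.take (j + 2) :: goB p (seg.drop (j + 1)) := by
  rw [goB.eq_def]; split
  · next heq => rw [h] at heq; cases heq
  · next j' heq => rw [h] at heq; cases heq; rfl

theorem goPending_none (p : Bool) (pending l : List Int) (h : PySem.List.index? l 0 = none) :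
    goPending p pending l = if p then [pending ++ l] else [] := by
  rw [goPending.eq_def]; split
  · rfl
  · next j heq => rw [h] at heq; cases heq

theorem goPending_some (p : Bool) (pending l : List Int) (j : Nat)
    (h : PySem.List.index? l 0 = some j) :
    goPending p pending l = (pending ++ l.take (j + 1)) :: goPending p [0] (l.drop (j + 1)) := by
  rw [goPending.eq_def]; split
  · next heq => rw [h] at heq; cases heq
  · next j' heq => rw [h] at heq; cases heq; rfl

-- scanning a zero-free block just extends the pending route
theorem foldl_stepA_no_zero (l : List Int) (routes : List (List Int)) (route : List Int)
    (h : (0 : Int) ∉ l) : l.foldl stepA (routes, route) = (routes, route ++ l) := by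
  induction l generalizing route with
  | nil => simp
  | cons x xs ih =>
    have hx : x ≠ 0 := by rintro rfl; exact h (List.mem_cons_self)
    have hxs : (0 : Int) ∉ xs := fun hm => h (List.mem_cons_of_mem _ hm)
    simp [List.foldl_cons, stepA, hx, ih _ hxs]

-- A's fold from a nonempty pending route computes goPending
theorem foldl_stepA_goPending (partial_ : Bool) (l : List Int) :
    ∀ (routes : List (List Int)) (route : List Int), route ≠ [] →
    (if partial_ then (l.foldl stepA (routes, route)).1 ++ [(l.foldl stepA (routes, route)).2]
     else (l.foldl stepA (routes, route)).1) = routes ++ goPending partial_ route l := by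
  induction hn : l.length using Nat.strong_induction_on generalizing l with
  | _ n ih =>
  intro routes route hroute
  cases hidx : PySem.List.index? l 0 with
  | none =>
    have h0 : (0 : Int) ∉ l := (PySem.List.index?_eq_none_iff _ _).mp hidx
    rw [goPending_none partial_ route l hidx, foldl_stepA_no_zero l routes route h0]
    cases partial_ <;> simp
  | some j =>
    obtain ⟨pre, suf, hdecomp, hlen, hpre⟩ := (PySem.List.index?_eq_some_iff _ _ _).mp hidx
    subst hdecomp
    rw [goPending_some partial_ route _ j hidx]
    have htake : (pre ++ (0 : Int) :: suf).take (j + 1) = pre ++ [0] := by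
      subst hlen; rw [List.take_append]; simp
    have hdrop : (pre ++ (0 : Int) :: suf).drop (j + 1) = suf := by
      subst hlen; rw [List.drop_append]; simp
    rw [List.foldl_append, foldl_stepA_no_zero pre routes route hpre]
    have hrne : route ++ pre ≠ [] := by simp [hroute]
    have hstep : stepA (routes, route ++ pre) 0
        = (routes ++ [route ++ pre ++ [0]], [(0 : Int)]) := by
      simp [stepA, hrne]
    rw [List.foldl_cons, hstep]
    have hlensuf : suf.length < n := by subst hn; simp; omega
    rw [ih suf.length hlensuf suf rfl _ [0] (by simp)]
    rw [htake, hdrop]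
    simp

-- B's go on a nonempty segment is goPending with the head pending
theorem goB_eq_goPending (partial_ : Bool) (l : List Int) :
    ∀ (c : Int), goB partial_ (c :: l) = goPending partial_ [c] l := by
  induction hn : l.length using Nat.strong_induction_on generalizing l with
  | _ n ih =>
  intro c
  cases hidx : PySem.List.index? l 0 with
  | none =>
    rw [goB_none partial_ (c :: l) (by simpa using hidx), goPending_none partial_ [c] l hidx]
    rfl
  | some j =>
    obtain ⟨pre, suf, hdecomp, hlen, hpre⟩ := (PySem.List.index?_eq_some_iff _ _ _).mp hidx
    subst hdecomp
    rw [goB_some partial_ (c :: (pre ++ (0 : Int) :: suf)) j (by simpa using hidx),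
      goPending_some partial_ [c] _ j hidx]
    have htake1 : (pre ++ (0 : Int) :: suf).take (j + 1) = pre ++ [0] := by
      subst hlen; rw [List.take_append]; simp
    have htake : (c :: (pre ++ (0 : Int) :: suf)).take (j + 2) = c :: (pre ++ [0]) := by
      simp [htake1]
    have hdrop : (c :: (pre ++ (0 : Int) :: suf)).drop (j + 1) = (0 : Int) :: suf := by
      subst hlen
      simpa using List.drop_append (l₁ := pre) (l₂ := (0 : Int) :: suf) (i := 0)
    have hdropj1 : (pre ++ (0 : Int) :: suf).drop (j + 1) = suf := by
      subst hlen; rw [List.drop_append]; simp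
    have hlensuf : suf.length < n := by subst hn; simp; omega
    rw [htake, hdrop, ih suf.length hlensuf suf rfl (0 : Int)]
    rw [htake1, hdropj1]
    simp

-- ===== VERDICT (by name: the statement is the Claim_ definition above) =====
theorem solution_to_routes_spec : Claim_equal_solution_to_routes := by
  intro solution partial_ _
  unfold Spec_solution_to_routes solution_to_routes solution_to_routes_alt
  cases solution with
  | nil =>
    rw [goB_none partial_ [] rfl]
    cases partial_ <;> simp
  | cons x xs =>
    have hfirst : stepA ([], []) x = ([], [x]) := by simp [stepA]
    rw [List.foldl_cons, hfirst, goB_eq_goPending,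
      foldl_stepA_goPending partial_ xs [] [x] (by simp)]
    simp
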